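-- pv_equiv track=rewrite | github.com/Burgeoned/DSCI-553 | Homework 2/task2.py | group_by_size
-- ===== SOURCE A (Python) =====
-- def group_by_size(itemsets):
--     #store groups by size
--     by_size = {}
--     #iterate through itemsets and check size (length of tuple)
--     for sets in itemsets:
--         size = len(sets)
--         #if the size doesn't exist, make new list
--         if size not in by_size:
--             by_size[size] = []
--         #add to list of that size
--         by_size[size].append(sets)
--
--     #hold the groups
--     groups = []
--     #sort by size and then by lexicographically inside the size
--     for size in sorted(by_size.keys()):
--         groups.append((size, sorted(by_size[size])))
--
--     return groups
-- ===== SOURCE B (Python) =====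
-- def group_by_size(itemsets):
--     # Sort once by (size, itemset); each run of equal sizes is then one group,
--     # already in lexicographic order, and runs appear in increasing size order.
--     ordered = sorted(itemsets, key=lambda s: (len(s), s))
--     groups = []
--     i = 0
--     n = len(ordered)
--     while i < n:
--         size = len(ordered[i])
--         j = i + 1
--         while j < n and len(ordered[j]) == size:
--             j += 1
--         groups.append((size, ordered[i:j]))
--         i = j
--     return groups
-- ===== Notes on version B (the rewrite author's own statement) =====
-- stated objective: alternative
-- what changed: Replaces the dict-bucketing pass plus per-bucket sorts with a single sort by the composite key (len, itemset) followed by one linear scan that slices out each run of equal sizes.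
import Mathlib
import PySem

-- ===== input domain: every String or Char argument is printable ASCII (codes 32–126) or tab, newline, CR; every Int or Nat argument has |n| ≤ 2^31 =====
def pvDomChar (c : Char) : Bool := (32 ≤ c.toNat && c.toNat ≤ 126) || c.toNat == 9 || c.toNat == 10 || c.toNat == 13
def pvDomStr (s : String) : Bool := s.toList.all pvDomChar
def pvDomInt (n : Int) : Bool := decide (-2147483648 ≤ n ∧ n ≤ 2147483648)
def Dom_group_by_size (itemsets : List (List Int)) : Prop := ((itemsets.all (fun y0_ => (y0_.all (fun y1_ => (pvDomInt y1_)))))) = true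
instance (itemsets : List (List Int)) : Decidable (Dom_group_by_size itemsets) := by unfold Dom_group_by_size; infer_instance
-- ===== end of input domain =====

-- B replaces A's dict bucketing + per-bucket sorts by ONE sort on the composite key (len, itemset)
-- followed by a single scan slicing out each run of equal sizes (objective: alternative algorithm).

-- ===== PORT A =====
def group_by_size (itemsets : List (List Int)) : List (Int × List (List Int)) :=
  -- by_size = {}; for sets in itemsets: … (dict bucketing loop)
  let by_size : PySem.Dict Int (List (List Int)) :=
    itemsets.foldl (fun d sets =>
      let size : Int := sets.length
      let d' := if d.contains size then d else d.insert size ([] : List (List Int))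
      d'.modify size [] (fun l => l ++ [sets])) PySem.Dict.empty
  -- groups = []; for size in sorted(by_size.keys()): groups.append((size, sorted(by_size[size])))
  (PySem.List.sorted by_size.keys (fun k => k) false).foldl
    (fun groups size => groups ++ [(size, PySem.List.sorted (by_size.getD size []) (fun s => s) false)]) []

-- ===== PORT B =====
-- the scan of Source B: emit the run of itemsets sharing the first element's size, continue past it
def pyRuns : List (List Int) → List (Int × List (List Int))
  | [] => []
  | x :: xs =>
    let size : Int := x.length
    (size, x :: xs.takeWhile (fun y => (y.length : Int) == size)) ::
      pyRuns (xs.dropWhile (fun y => (y.length : Int) == size))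
termination_by l => l.length
decreasing_by simpa using Nat.lt_succ_of_le (List.length_dropWhile_le _ xs)

def group_by_size_alt (itemsets : List (List Int)) : List (Int × List (List Int)) :=
  pyRuns (PySem.List.sorted2 itemsets (fun s => (s.length : Int)) (fun s => s) false)

-- ===== PRECONDITION & SPEC =====
def Spec_group_by_size (itemsets : List (List Int)) (out : List (Int × List (List Int))) : Prop := out = group_by_size_alt itemsets
instance (itemsets : List (List Int)) (out : List (Int × List (List Int))) : Decidable (Spec_group_by_size itemsets out) := by unfold Spec_group_by_size; infer_instance

-- ===== CLAIM (what is proved, stated in full; the proofs are below) =====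
def Claim_equal_group_by_size : Prop := ∀ (itemsets : List (List Int)), Dom_group_by_size itemsets → Spec_group_by_size itemsets (group_by_size itemsets)

-- ===== LEMMAS AND PROOFS =====

-- canonical form both programs are reduced to: sizes ascending, each group sorted lexicographically
def szOf (s : List Int) : Int := s.length
def sizesOf (itemsets : List (List Int)) : List Int :=
  PySem.List.sorted (PySem.Set.ofList (itemsets.map szOf)) (fun k => k) false
def blockOf (itemsets : List (List Int)) (k : Int) : List (List Int) :=
  @PySem.List.sorted _ _ _ LinearOrder.toDecidableLT (itemsets.filter (fun s => szOf s == k)) (fun s => s) false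
def canon (itemsets : List (List Int)) : List (Int × List (List Int)) :=
  (sizesOf itemsets).map (fun k => (k, blockOf itemsets k))

-- two Decidable instances for the same order sort identically
lemma sorted_inst_irrel {α κ : Type} [LT κ] (i₁ i₂ : DecidableLT κ) (xs : List α) (key : α → κ) (rev : Bool) :
    @PySem.List.sorted α κ _ i₁ xs key rev = @PySem.List.sorted α κ _ i₂ xs key rev := by
  have : i₁ = i₂ := by funext a b; exact Subsingleton.elim _ _
  rw [this]

-- A-side ------------------------------------------------------------------

lemma step_eq (d : PySem.Dict Int (List (List Int))) (s : List Int) :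
    (let size : Int := s.length
     let d' := if d.contains size then d else d.insert size ([] : List (List Int))
     d'.modify size [] (fun l => l ++ [s])) = d.modify (szOf s) [] (fun l => l ++ [s]) := by
  by_cases h : d.contains (s.length : Int)
  · simp [h, szOf]
  · simp only [szOf, Bool.not_eq_true] at h ⊢
    simp only [h, if_neg Bool.false_ne_true, PySem.Dict.modify,
      PySem.Dict.getD_insert_self, PySem.Dict.insert_insert_self,
      PySem.Dict.getD_of_not_contains d _ h]
lemma by_size_eq (itemsets : List (List Int)) :
    itemsets.foldl (fun d sets =>
      let size : Int := sets.length
      let d' := if d.contains size then d else d.insert size ([] : List (List Int))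
      d'.modify size [] (fun l => l ++ [sets])) PySem.Dict.empty
    = itemsets.foldl (fun d s => d.modify (szOf s) [] (fun l => l ++ [s])) PySem.Dict.empty := by
  exact PySem.List.foldl_congr_mem _ _ _ _ (fun acc x _ => step_eq acc x)

lemma by_size_keys (itemsets : List (List Int)) :
    (itemsets.foldl (fun d s => d.modify (szOf s) [] (fun l => l ++ [s]))
      (PySem.Dict.empty : PySem.Dict Int (List (List Int)))).keys
    = PySem.Set.ofList (itemsets.map szOf) := by
  rw [PySem.Dict.keys_foldl_modify_key itemsets szOf [] (fun _ s => fun l => l ++ [s]) PySem.Dict.empty]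
  rfl

lemma by_size_getD (itemsets : List (List Int)) (k : Int) :
    (itemsets.foldl (fun d s => d.modify (szOf s) [] (fun l => l ++ [s]))
      (PySem.Dict.empty : PySem.Dict Int (List (List Int)))).getD k []
    = itemsets.filter (fun s => szOf s == k) := by
  have h : itemsets.foldl (fun d s => d.modify (szOf s) [] (fun l => l ++ [s]))
      (PySem.Dict.empty : PySem.Dict Int (List (List Int)))
      = (itemsets.map (fun s => (szOf s, s))).foldl
          (fun d p => d.modify p.1 [] (fun l => l ++ [p.2])) PySem.Dict.empty := by
    rw [List.foldl_map]
  rw [h, PySem.Dict.getD_foldl_modify_append, List.filter_map]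
  simp only [PySem.Dict.getD_empty, List.nil_append, List.map_map]
  rw [show ((fun x : Int × List Int => x.2) ∘ fun s : List Int => (szOf s, s)) = id from rfl, List.map_id]
  exact List.filter_congr (fun x _ => rfl)

lemma A_eq_canon (itemsets : List (List Int)) : group_by_size itemsets = canon itemsets := by
  show (PySem.List.sorted _ (fun k => k) false).foldl _ [] = _
  rw [by_size_eq, PySem.List.foldl_append_singleton_eq_map]
  rw [by_size_keys]
  unfold canon sizesOf blockOf
  simp only [List.nil_append]
  apply List.map_congr_left
  intro k _
  rw [by_size_getD]
  exact congrArg (fun l => (k, l)) (sorted_inst_irrel _ _ _ _ _)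

-- B-side ------------------------------------------------------------------

lemma sorted2_eq (itemsets : List (List Int)) :
    PySem.List.sorted2 itemsets (fun s => (s.length : Int)) (fun s => s) false
      = PySem.List.sorted itemsets (fun s => toLex ((s.length : Int), s)) false := by
  unfold PySem.List.sorted2 PySem.List.sorted
  simp only [if_neg Bool.false_ne_true]
  congr 1
  funext acc x
  congr 1
  funext a b
  rcases lt_trichotomy ((a.length : Int)) ((b.length : Int)) with h | h | h
  · simp [h, Prod.Lex.lt_iff]
  · simp [h, Prod.Lex.lt_iff]
  · simp [h, Prod.Lex.lt_iff, not_lt_of_gt h, ne_of_gt h]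

lemma perm_filter_disjoint {α : Type} (p q : α → Bool) (l : List α)
    (h : ∀ x ∈ l, p x = true → q x = false) :
    (l.filter p ++ l.filter q).Perm (l.filter (fun x => p x || q x)) := by
  induction l with
  | nil => simp
  | cons x t ih =>
    have ih' := ih (fun y hy => h y (List.mem_cons_of_mem _ hy))
    by_cases hp : p x = true
    · have hq := h x (List.mem_cons_self ..) hp
      simp only [List.filter_cons, hp, hq, Bool.true_or, if_true, Bool.false_eq_true, if_false,
        List.cons_append]
      exact ih'.cons x
    · simp only [Bool.not_eq_true] at hp
      by_cases hq : q x = true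
      · simp only [List.filter_cons, hp, hq, Bool.false_or, Bool.false_eq_true, if_false, if_true]
        exact (List.perm_middle).trans (ih'.cons x)
      · simp only [Bool.not_eq_true] at hq
        simp only [List.filter_cons, hp, hq, Bool.false_or, Bool.false_eq_true, if_false]
        exact ih'

lemma filter_cover_perm {α : Type} (key : α → Int) (K : List Int) (l : List α)
    (hnd : K.Nodup) (hcov : ∀ x ∈ l, key x ∈ K) :
    ((K.map (fun k => l.filter (fun x => key x == k))).flatten).Perm l := by
  have main : ∀ K' : List Int, K'.Nodup →
      ((K'.map (fun k => l.filter (fun x => key x == k))).flatten).Perm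
        (l.filter (fun x => decide (key x ∈ K'))) := by
    intro K' hnd'
    induction K' with
    | nil => simp
    | cons k t ih =>
      have hk : k ∉ t := (List.nodup_cons.mp hnd').1
      have iht := ih (List.nodup_cons.mp hnd').2
      simp only [List.map_cons, List.flatten_cons]
      have step : (l.filter (fun x => key x == k) ++ l.filter (fun x => decide (key x ∈ t))).Perm
          (l.filter (fun x => decide (key x ∈ k :: t))) := by
        have := perm_filter_disjoint (fun x => key x == k) (fun x => decide (key x ∈ t)) l
          (fun x _ hx => by
            have : key x = k := by simpa using hx
            simp [this, hk])
        refine this.trans (List.Perm.of_eq (List.filter_congr ?_))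
        intro x _
        simp [List.mem_cons, eq_comm, beq_eq_decide]
      exact ((iht.append_left _).trans step)
  have := main K hnd
  rwa [List.filter_eq_self.mpr (fun a ha => by simpa using hcov a ha)] at this
lemma mem_blockOf {itemsets : List (List Int)} {k : Int} {s : List Int}
    (h : s ∈ blockOf itemsets k) : s ∈ itemsets ∧ (s.length : Int) = k := by
  have := (@PySem.List.sorted_perm (List Int) (List Int) _ LinearOrder.toDecidableLT
    (itemsets.filter (fun s => szOf s == k)) (fun s => s) false).mem_iff.mp h
  have hm := List.mem_filter.mp this
  exact ⟨hm.1, by simpa [szOf] using hm.2⟩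

lemma sizesOf_pairwise_lt (itemsets : List (List Int)) :
    (sizesOf itemsets).Pairwise (· < ·) := by
  have hle : (sizesOf itemsets).Pairwise (· ≤ ·) :=
    PySem.List.sorted_pairwise (PySem.Set.ofList (itemsets.map szOf)) (fun k => k)
  have hnd : (sizesOf itemsets).Nodup :=
    ((PySem.List.sorted_perm _ _ _).nodup_iff).mpr (PySem.Set.nodup_ofList _)
  exact (hle.and hnd).imp (fun h => lt_of_le_of_ne h.1 h.2)

lemma mem_sizesOf {itemsets : List (List Int)} {k : Int} :
    k ∈ sizesOf itemsets ↔ k ∈ itemsets.map szOf := by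
  unfold sizesOf
  rw [(PySem.List.sorted_perm _ _ _).mem_iff, PySem.Set.mem_ofList]

lemma sorted_key_eq_flatten (itemsets : List (List Int)) :
    PySem.List.sorted itemsets (fun s => toLex ((s.length : Int), s)) false
      = ((sizesOf itemsets).map (blockOf itemsets)).flatten := by
  apply PySem.List.eq_of_perm_of_pairwise_le_of_injective
    (key := fun s : List Int => toLex ((s.length : Int), s))
  · intro a b h
    simpa using congrArg (fun x : Lex (Int × List Int) => (ofLex x).2) h
  · -- Perm
    refine (PySem.List.sorted_perm _ _ _).trans ?_
    have h1 : (((sizesOf itemsets).map (fun k => itemsets.filter (fun s => szOf s == k))).flatten).Perm itemsets :=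
      filter_cover_perm szOf (sizesOf itemsets) itemsets
        (sizesOf_pairwise_lt itemsets).nodup
        (fun x hx => mem_sizesOf.mpr (List.mem_map_of_mem hx))
    have hb : (((sizesOf itemsets).map (blockOf itemsets)).flatten).Perm
        (((sizesOf itemsets).map (fun k => itemsets.filter (fun s => szOf s == k))).flatten) := by
      apply List.Perm.flatten_congr
      rw [List.forall₂_map_right_iff, List.forall₂_map_left_iff]
      refine List.forall₂_same.mpr (fun k _ => ?_)
      exact @PySem.List.sorted_perm (List Int) (List Int) _ LinearOrder.toDecidableLT _ _ _
    exact (h1.symm.trans hb.symm).symm.symm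
  · exact PySem.List.sorted_pairwise _ _
  · rw [List.pairwise_flatten]
    constructor
    · intro l hl
      obtain ⟨k, hk, rfl⟩ := List.mem_map.mp hl
      have hw : (blockOf itemsets k).Pairwise (fun a b : List Int => a ≤ b) := by
        unfold blockOf
        exact PySem.List.sorted_pairwise _ _
      refine hw.imp_of_mem (fun {a b} ha hb hab => ?_)
      have h1 := (mem_blockOf ha).2
      have h2 := (mem_blockOf hb).2
      rw [Prod.Lex.le_iff]
      right
      exact ⟨by simp [h1, h2], hab⟩
    · have := sizesOf_pairwise_lt itemsets
      rw [List.pairwise_map]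
      refine this.imp_of_mem (fun {k₁ k₂} h1 h2 hlt => ?_)
      intro x hx y hy
      rw [Prod.Lex.le_iff]
      left
      rw [(mem_blockOf hx).2, (mem_blockOf hy).2]
      exact hlt
lemma pyRuns_flatten (S : List Int) (B : Int → List (List Int))
    (hne : ∀ k ∈ S, B k ≠ [])
    (hlen : ∀ k ∈ S, ∀ s ∈ B k, (s.length : Int) = k)
    (hnd : S.Pairwise (· ≠ ·)) :
    pyRuns ((S.map B).flatten) = S.map (fun k => (k, B k)) := by
  induction S with
  | nil => simp [pyRuns]
  | cons k t ih =>
    obtain ⟨x, g, hxg⟩ : ∃ x g, B k = x :: g := by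
      cases hB : B k with
      | nil => exact absurd hB (hne k (List.mem_cons_self ..))
      | cons x g => exact ⟨x, g, rfl⟩
    have hxk : (x.length : Int) = k := hlen k (List.mem_cons_self ..) x (by simp [hxg])
    have hgk : ∀ y ∈ g, (y.length : Int) = k :=
      fun y hy => hlen k (List.mem_cons_self ..) y (by simp [hxg, hy])
    have hrest : ∀ y ∈ (t.map B).flatten, (y.length : Int) ≠ k := by
      intro y hy
      obtain ⟨l, hl, hyl⟩ := List.mem_flatten.mp hy
      obtain ⟨k', hk', rfl⟩ := List.mem_map.mp hl
      rw [hlen k' (List.mem_cons_of_mem _ hk') y hyl]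
      intro hcon
      exact (List.pairwise_cons.mp hnd).1 k' hk' hcon.symm
    have hp : ∀ y ∈ g, ((y.length : Int) == (x.length : Int)) = true := by
      intro y hy; simp [hgk y hy, hxk]
    have hpr : ∀ y ∈ (t.map B).flatten, ((y.length : Int) == (x.length : Int)) = false := by
      intro y hy; simp [hxk]; exact hrest y hy
    have hflat : ((k :: t).map B).flatten = x :: (g ++ (t.map B).flatten) := by
      simp [hxg]
    rw [hflat]
    rw [pyRuns]
    have htake : (g ++ (t.map B).flatten).takeWhile (fun y => (y.length : Int) == (x.length : Int)) = g := by
      rw [List.takeWhile_append]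
      rw [List.takeWhile_eq_self_iff.mpr hp,
        List.takeWhile_eq_nil_iff.mpr
          (fun hl => by simp only [Bool.not_eq_true]; exact hpr _ (List.get_mem _ _))]
      simp
    have hdrop : (g ++ (t.map B).flatten).dropWhile (fun y => (y.length : Int) == (x.length : Int))
        = (t.map B).flatten := by
      rw [List.dropWhile_append, List.dropWhile_eq_nil_iff.mpr hp,
        List.dropWhile_eq_self_iff.mpr
          (fun hl => by simp only [Bool.not_eq_true]; exact hpr _ (List.getElem_mem _))]
      simp
    rw [htake, hdrop]
    rw [ih (fun k' hk' => hne k' (List.mem_cons_of_mem _ hk'))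
      (fun k' hk' => hlen k' (List.mem_cons_of_mem _ hk'))
      (List.pairwise_cons.mp hnd).2]
    simp [hxg, hxk]
lemma B_eq_canon (itemsets : List (List Int)) : group_by_size_alt itemsets = canon itemsets := by
  unfold group_by_size_alt
  rw [sorted2_eq, sorted_key_eq_flatten]
  rw [pyRuns_flatten]
  · rfl
  · intro k hk
    obtain ⟨s, hs, hsk⟩ := List.mem_map.mp (mem_sizesOf.mp hk)
    unfold blockOf
    rw [Ne, @PySem.List.sorted_eq_nil_iff (List Int) (List Int) _ LinearOrder.toDecidableLT _ _ _]
    intro hcon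
    have : s ∈ itemsets.filter (fun s => szOf s == k) :=
      List.mem_filter.mpr ⟨hs, by simp [hsk]⟩
    simp [hcon] at this
  · exact fun k hk s hsk => (mem_blockOf hsk).2
  · exact (sizesOf_pairwise_lt itemsets).imp ne_of_lt

-- ===== VERDICT (by name: the statement is the Claim_ definition above) =====
theorem group_by_size_spec : Claim_equal_group_by_size := by
  intro itemsets _
  unfold Spec_group_by_size
  rw [A_eq_canon, B_eq_canon]
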